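-- pv_equiv track=rewrite | github.com/shadowfansub/projects | cross-reference.py | generate_colored_diff
-- ===== SOURCE A (Python) =====
-- from difflib import ndiff, SequenceMatcher
--
-- class Colors:
--     RED = "\033[91m"
--     GREEN = "\033[92m"
--     YELLOW = "\033[93m"
--     BLUE = "\033[94m"
--     MAGENTA = "\033[95m"
--     CYAN = "\033[96m"
--     WHITE = "\033[97m"
--     RESET = "\033[0m"
--     BOLD = "\033[1m"
--     DIM = "\033[2m"
--
-- def generate_colored_diff(text1, text2, use_colors=True):
--     diff = list(ndiff([text1], [text2]))
--
--     if len(diff) == 1 and diff[0].startswith("  "):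
--         return None
--
--     result = []
--     for line in diff:
--         if line.startswith("- "):
--             if use_colors:
--                 result.append(f"{Colors.RED}  - Source:  {line[2:]}{Colors.RESET}")
--             else:
--                 result.append(f"  - Source:  {line[2:]}")
--         elif line.startswith("+ "):
--             if use_colors:
--                 result.append(f"{Colors.GREEN}  + Target:  {line[2:]}{Colors.RESET}")
--             else:
--                 result.append(f"  + Target:  {line[2:]}")
--         elif line.startswith("? "):
--             continue
--
--     return "\n".join(result) if result else None
-- ===== SOURCE B (Python) =====
-- class Colors:
--     RED = "\033[91m"
--     GREEN = "\033[92m"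
--     RESET = "\033[0m"
--
-- def generate_colored_diff(text1, text2, use_colors=True):
--     if text1 == text2:
--         return None
--     src = "  - Source:  " + text1
--     tgt = "  + Target:  " + text2
--     if use_colors:
--         src = Colors.RED + src + Colors.RESET
--         tgt = Colors.GREEN + tgt + Colors.RESET
--     return src + "\n" + tgt
-- ===== Notes on version B (the rewrite author's own statement) =====
-- stated objective: simpler
-- what changed: B drops difflib.ndiff and the loop over diff lines entirely: for single-element inputs the only outcomes are None (equal texts) or exactly one source line followed by one target line, which B builds directly by string concatenation.
import Mathlib
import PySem

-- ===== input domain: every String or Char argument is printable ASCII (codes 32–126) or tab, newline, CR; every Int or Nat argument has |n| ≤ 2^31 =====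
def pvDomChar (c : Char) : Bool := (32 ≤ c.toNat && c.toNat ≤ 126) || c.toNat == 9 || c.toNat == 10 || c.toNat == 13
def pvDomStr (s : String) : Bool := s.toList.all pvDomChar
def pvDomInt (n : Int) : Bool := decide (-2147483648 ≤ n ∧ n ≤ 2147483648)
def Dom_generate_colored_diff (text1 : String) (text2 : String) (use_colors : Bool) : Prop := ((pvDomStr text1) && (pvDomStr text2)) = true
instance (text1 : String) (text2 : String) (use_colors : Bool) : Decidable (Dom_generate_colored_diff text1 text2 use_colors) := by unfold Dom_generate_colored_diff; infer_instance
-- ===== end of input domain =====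

-- B builds the two output lines directly (None when the texts are equal) instead of running
-- difflib.ndiff and filtering its output lines through a loop: simpler, no diff machinery.

-- ===== PORT A =====
-- ANSI escape constants of the Colors class (as char lists; all string work is on List Char)
def pvRED : List Char := '\x1b' :: ['[', '9', '1', 'm']
def pvGREEN : List Char := '\x1b' :: ['[', '9', '2', 'm']
def pvRESET : List Char := '\x1b' :: ['[', '0', 'm']

-- ndiff([text1],[text2]) for single-element lists: ['  '+t1] when equal, else
-- ['- '+t1, (optional '? ' guide), '+ '+t2, (optional '? ' guide)].  The '? ' guide lines are
-- omitted from the model: A's loop 'continue's on them and they cannot make len(diff)==1, so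
-- they never influence A's result; with that, the model is exact on all string inputs.
def pvNdiff1 (t1 t2 : List Char) : List (List Char) :=
  if t1 = t2 then [' ' :: ' ' :: t1]
  else [('-' :: ' ' :: t1), ('+' :: ' ' :: t2)]

-- literal transliteration of A's code (operating on .toList; result rebuilt with String.ofList)
def generate_colored_diff (text1 : String) (text2 : String) (use_colors : Bool) : Option String :=
  let diff := pvNdiff1 text1.toList text2.toList
  if diff.length = 1 ∧ PySem.Chars.startswith (diff.headD []) [' ', ' '] then none
  else
    let result : List (List Char) := diff.foldl (fun result line =>
      if PySem.Chars.startswith line ['-', ' '] then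
        if use_colors then
          result ++ [pvRED ++ ("  - Source:  ".toList ++ PySem.List.slice line (some 2) none) ++ pvRESET]
        else
          result ++ ["  - Source:  ".toList ++ PySem.List.slice line (some 2) none]
      else if PySem.Chars.startswith line ['+', ' '] then
        if use_colors then
          result ++ [pvGREEN ++ ("  + Target:  ".toList ++ PySem.List.slice line (some 2) none) ++ pvRESET]
        else
          result ++ ["  + Target:  ".toList ++ PySem.List.slice line (some 2) none]
      else result) []
    if result ≠ [] then some (String.ofList (PySem.Chars.join ['\n'] result)) else none

-- ===== PORT B =====
-- literal transliteration of B (Source B): direct construction, no diff list, no loop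
def generate_colored_diff_alt (text1 : String) (text2 : String) (use_colors : Bool) : Option String :=
  if text1 = text2 then none
  else
    let src0 := "  - Source:  ".toList ++ text1.toList
    let tgt0 := "  + Target:  ".toList ++ text2.toList
    let src := if use_colors then pvRED ++ src0 ++ pvRESET else src0
    let tgt := if use_colors then pvGREEN ++ tgt0 ++ pvRESET else tgt0
    some (String.ofList (src ++ '\n' :: tgt))

-- ===== PRECONDITION & SPEC =====
def Spec_generate_colored_diff (text1 : String) (text2 : String) (use_colors : Bool) (out : Option String) : Prop := out = generate_colored_diff_alt text1 text2 use_colors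
instance (text1 : String) (text2 : String) (use_colors : Bool) (out : Option String) : Decidable (Spec_generate_colored_diff text1 text2 use_colors out) := by unfold Spec_generate_colored_diff; infer_instance

-- ===== CLAIM (what is proved, stated in full; the proofs are below) =====
def Claim_equal_generate_colored_diff : Prop := ∀ (text1 : String) (text2 : String) (use_colors : Bool), Dom_generate_colored_diff text1 text2 use_colors → Spec_generate_colored_diff text1 text2 use_colors (generate_colored_diff text1 text2 use_colors)

-- ===== LEMMAS AND PROOFS =====

theorem pv_take_toList (s : String) : List.take s.length s.toList = s.toList := by simp

-- ===== VERDICT (by name: the statement is the Claim_ definition above) =====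
theorem generate_colored_diff_spec : Claim_equal_generate_colored_diff := by
  intro text1 text2 use_colors _
  unfold Spec_generate_colored_diff generate_colored_diff generate_colored_diff_alt pvNdiff1
  by_cases h : text1 = text2
  · simp [h, PySem.Chars.startswith]
  · have h' : text1.toList ≠ text2.toList := fun hc => h (String.toList_injective hc)
    cases use_colors <;>
      simp [h, h', PySem.Chars.startswith, PySem.List.slice, PySem.List.clampIdx,
        PySem.Chars.join, List.foldl, List.intercalate, pvRED, pvGREEN, pvRESET, pv_take_toList]
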